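-- pv_equiv track=rewrite | github.com/yaromochka/DSTU | PythonLang/FormalLang/secondLaboratory/chain_rules.py | _expand_pairs
-- ===== SOURCE A (Python) =====
-- from typing import Any, Generator
--
-- def _expand_pairs(
--         pairs: list[tuple[str, str]],
--         rules: dict[str, list[str]],
--         not_terminals: set[str],
--         char: str) -> Generator[tuple[str, str], Any, None]:
--
--     for left, right in pairs:
--         if right == char:
--             yield from ((left, elem) for elem in rules[char] if elem in not_terminals and elem != char)
-- ===== SOURCE B (Python) =====
-- def _expand_pairs(pairs, rules, not_terminals, char):
--     # Flat-index enumeration: collect matching lefts, build the filtered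
--     # expansion list once, then emit entry k of the cross product by
--     # divmod arithmetic on a single counter (no nested loops).
--     matching = [left for left, right in pairs if right == char]
--     if matching:
--         valids = [e for e in rules[char] if e in not_terminals and e != char]
--         v = len(valids)
--         for k in range(len(matching) * v):
--             yield (matching[k // v], valids[k % v])
-- ===== Notes on version B (the rewrite author's own statement) =====
-- stated objective: alternative
-- what changed: B collects the matching left sides, builds the filtered expansion list from rules[char] once, and then emits the k-th element of the cross product for a single flat counter k using divmod indexing, instead of A's nested loop that re-filters rules[char] inside every matching iteration.
import Mathlib
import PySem

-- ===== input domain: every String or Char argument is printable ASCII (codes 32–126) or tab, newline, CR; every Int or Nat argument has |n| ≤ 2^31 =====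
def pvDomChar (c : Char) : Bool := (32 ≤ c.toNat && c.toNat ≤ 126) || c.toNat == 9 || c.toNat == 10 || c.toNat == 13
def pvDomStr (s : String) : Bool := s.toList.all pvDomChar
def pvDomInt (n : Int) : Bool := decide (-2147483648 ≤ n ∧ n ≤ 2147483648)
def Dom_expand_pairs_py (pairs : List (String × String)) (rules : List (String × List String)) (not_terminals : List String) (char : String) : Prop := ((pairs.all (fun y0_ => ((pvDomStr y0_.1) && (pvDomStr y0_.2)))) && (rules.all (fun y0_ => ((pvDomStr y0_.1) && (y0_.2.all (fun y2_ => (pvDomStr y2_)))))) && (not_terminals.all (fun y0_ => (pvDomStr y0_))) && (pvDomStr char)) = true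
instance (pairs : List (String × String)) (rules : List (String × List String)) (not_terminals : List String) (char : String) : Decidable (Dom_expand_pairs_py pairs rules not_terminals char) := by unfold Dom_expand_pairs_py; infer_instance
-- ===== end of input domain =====

-- B collects the matching left sides, builds the filtered expansion list from
-- rules[char] once, and emits the k-th cross-product entry for one flat counter
-- k via divmod indexing; A's nested loop re-filters rules[char] on every match
-- (objective: alternative). Both generators are compared as the list of yields.

-- ===== PORT A =====
-- for left, right in pairs: if right == char: yield filtered rules[char] pairs.
-- rules[char] is a first-match lookup on the association list; Pre_ guarantees
-- the key is present whenever the branch fires (otherwise Python raises KeyError).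
def expand_pairs_py (pairs : List (String × String)) (rules : List (String × List String)) (not_terminals : List String) (char : String) : List (String × String) :=
  match pairs with
  | [] => []
  | (left, right) :: rest =>
      (if right == char then
        (((rules.lookup char).getD []).filter
          (fun elem => not_terminals.contains elem && elem != char)).map (fun elem => (left, elem))
      else []) ++ expand_pairs_py rest rules not_terminals char

-- ===== PORT B =====
-- flat counter k over range(len(matching) * v); Python's k // v and k % v on
-- nonnegative ints are exactly Nat division/modulo, and the indices are in
-- range, so list indexing is ported with getD (the default is never used).
def expand_pairs_py_alt (pairs : List (String × String)) (rules : List (String × List String)) (not_terminals : List String) (char : String) : List (String × String) :=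
  let matching := (pairs.filter (fun p => p.2 == char)).map (fun p => p.1)
  if matching.isEmpty then []
  else
    let valids := ((rules.lookup char).getD []).filter
      (fun elem => not_terminals.contains elem && elem != char)
    let v := valids.length
    (List.range (matching.length * v)).map
      (fun k => (matching.getD (k / v) "", valids.getD (k % v) ""))

-- ===== PRECONDITION & SPEC =====
-- Pre_ excludes exactly the inputs on which Python A raises KeyError: some pair
-- has right == char while char is not a key of rules (B raises there too).
def Pre_expand_pairs_py (pairs : List (String × String)) (rules : List (String × List String)) (not_terminals : List String) (char : String) : Prop :=
  pairs.any (fun p => p.2 == char) = true → (rules.lookup char).isSome = true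
-- e.g. pairs = [("S", "a")], rules = {"a": ["S", "a", "B"]}, not_terminals =
-- {"S", "B"}, char = "a" satisfies it; with rules = {"b": ["S"]} it does not.
instance (pairs : List (String × String)) (rules : List (String × List String)) (not_terminals : List String) (char : String) : Decidable (Pre_expand_pairs_py pairs rules not_terminals char) := by unfold Pre_expand_pairs_py; infer_instance

def pvWitness_expand_pairs_py : (List (String × String)) × (List (String × List String)) × List String × String :=
  ([("S", "a"), ("A", "b")], [("a", ["S", "a", "B"])], ["S", "B"], "a")

def Spec_expand_pairs_py (pairs : List (String × String)) (rules : List (String × List String)) (not_terminals : List String) (char : String) (out : List (String × String)) : Prop := out = expand_pairs_py_alt pairs rules not_terminals char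
instance (pairs : List (String × String)) (rules : List (String × List String)) (not_terminals : List String) (char : String) (out : List (String × String)) : Decidable (Spec_expand_pairs_py pairs rules not_terminals char out) := by unfold Spec_expand_pairs_py; infer_instance

-- ===== CLAIM (what is proved, stated in full; the proofs are below) =====
def Claim_equal_expand_pairs_py : Prop := ∀ (pairs : List (String × String)) (rules : List (String × List String)) (not_terminals : List String) (char : String), Dom_expand_pairs_py pairs rules not_terminals char → Pre_expand_pairs_py pairs rules not_terminals char → Spec_expand_pairs_py pairs rules not_terminals char (expand_pairs_py pairs rules not_terminals char)

-- ===== LEMMAS AND PROOFS =====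

-- reading a list back through getD over range of its length, under any map
theorem map_getD_range {β γ : Type} (ys : List β) (d : β) (f : β → γ) :
    (List.range ys.length).map (fun k => f (ys.getD k d)) = ys.map f := by
  induction ys with
  | nil => rfl
  | cons y t ih =>
      simp only [List.length_cons, List.range_succ_eq_map, List.map_cons, List.map_map]
      simpa using ih

-- divmod enumeration of range (m*v) is the cross product, by induction on xs
theorem range_divmod_eq_flatMap {α β : Type} (xs : List α) (ys : List β) (d₁ : α) (d₂ : β) :
    (List.range (xs.length * ys.length)).map
        (fun k => (xs.getD (k / ys.length) d₁, ys.getD (k % ys.length) d₂)) =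
      xs.flatMap (fun x => ys.map (fun y => (x, y))) := by
  induction xs with
  | nil => simp
  | cons x t ih =>
      rcases Nat.eq_zero_or_pos ys.length with hv | hv
      · simp [List.length_eq_zero_iff.mp hv]
      · have h1 : (x :: t).length * ys.length = ys.length + t.length * ys.length := by
          simp [List.length_cons, Nat.succ_mul, Nat.add_comm]
        rw [h1, List.range_add, List.map_append, List.map_map, List.flatMap_cons]
        congr 1
        · have : ∀ k ∈ List.range ys.length,
              ((x :: t).getD (k / ys.length) d₁, ys.getD (k % ys.length) d₂)
                = (x, ys.getD k d₂) := by
            intro k hk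
            rw [List.mem_range] at hk
            rw [Nat.div_eq_of_lt hk, Nat.mod_eq_of_lt hk]
            rfl
          rw [List.map_congr_left this]
          simpa [Function.comp] using map_getD_range ys d₂ (fun y => (x, y))
        · rw [← ih]
          apply List.map_congr_left
          intro k _
          simp only [Function.comp]
          have hd : (ys.length + k) / ys.length = k / ys.length + 1 := by
            rw [Nat.add_comm, Nat.add_div_right _ hv]
          have hm : (ys.length + k) % ys.length = k % ys.length := Nat.add_mod_left _ _
          rw [hd, hm]
          rfl

-- A equals the cross product of the matching left sides with the filtered list
theorem expand_pairs_py_eq_flatMap (pairs : List (String × String)) (rules : List (String × List String)) (not_terminals : List String) (char : String) :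
    expand_pairs_py pairs rules not_terminals char =
      ((pairs.filter (fun p => p.2 == char)).map (fun p => p.1)).flatMap
        (fun left => (((rules.lookup char).getD []).filter
          (fun elem => not_terminals.contains elem && elem != char)).map (fun v => (left, v))) := by
  induction pairs with
  | nil => rfl
  | cons hd tl ih =>
      obtain ⟨l, r⟩ := hd
      simp only [expand_pairs_py, ih, List.filter_cons]
      by_cases h : (r == char) = true <;> simp [h]

-- ===== VERDICT (by name: the statement is the Claim_ definition above) =====
theorem expand_pairs_py_spec : Claim_equal_expand_pairs_py := by
  intro pairs rules not_terminals char _ _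
  unfold Spec_expand_pairs_py expand_pairs_py_alt
  rw [expand_pairs_py_eq_flatMap]
  by_cases h : ((pairs.filter (fun p => p.2 == char)).map (fun p => p.1)).isEmpty = true
  · rw [List.isEmpty_iff] at h
    simp [h]
  · simp only [h, Bool.false_eq_true, if_false]
    rw [range_divmod_eq_flatMap]
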